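-- pv_equiv track=rewrite | github.com/ingki3/simpleclaw | src/simpleclaw/memory/protected_section.py | _is_marker_on_own_line
-- ===== SOURCE A (Python) =====
-- def _is_marker_on_own_line(text: str, start: int, end: int) -> bool:
--     """``text[start:end]`` 가 자기 줄을 단독으로 차지하는지 검사.
--
--     "단독으로 차지" 는 마커 앞쪽이 (파일 시작 또는 줄바꿈) + 임의 공백, 마커 뒤쪽이
--     임의 공백 + (줄바꿈 또는 파일 끝) 임을 의미한다. 예를 들어 ``1. <!-- ... -->`` 처럼
--     같은 줄의 앞에 prose 가 있으면 *문서 설명용 인라인 mention* 으로 보고 진짜 marker 가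
--     아닌 것으로 판단한다.
--     """
--     # 앞쪽: 줄 시작까지 거슬러 올라가 모두 공백이어야 함.
--     i = start
--     while i > 0 and text[i - 1] in " \t":
--         i -= 1
--     if i > 0 and text[i - 1] != "\n":
--         return False
--     # 뒤쪽: 줄 끝까지 모두 공백이어야 함.
--     j = end
--     n = len(text)
--     while j < n and text[j] in " \t":
--         j += 1
--     if j < n and text[j] != "\n":
--         return False
--     return True
-- ===== SOURCE B (Python) =====
-- def _is_marker_on_own_line(text: str, start: int, end: int) -> bool:
--     before = text[:max(0, start)].split("\n")[-1]
--     after = text[end:].split("\n")[0]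
--     return not before.strip(" \t") and not after.strip(" \t")
-- ===== Notes on version B (the rewrite author's own statement) =====
-- stated objective: simpler
-- what changed: Instead of scanning outward character-by-character with two while loops and peeking at the stopping character, B slices the text at the marker span, splits each side into lines, takes the line fragment adjacent to the marker (last of text[:max(0,start)].split('\n'), first of text[end:].split('\n')), and tests that it strips to empty.
-- outside the precondition, e.g. on _is_marker_on_own_line('z \t', 0, -2): A returns False, B returns True
import Mathlib
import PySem

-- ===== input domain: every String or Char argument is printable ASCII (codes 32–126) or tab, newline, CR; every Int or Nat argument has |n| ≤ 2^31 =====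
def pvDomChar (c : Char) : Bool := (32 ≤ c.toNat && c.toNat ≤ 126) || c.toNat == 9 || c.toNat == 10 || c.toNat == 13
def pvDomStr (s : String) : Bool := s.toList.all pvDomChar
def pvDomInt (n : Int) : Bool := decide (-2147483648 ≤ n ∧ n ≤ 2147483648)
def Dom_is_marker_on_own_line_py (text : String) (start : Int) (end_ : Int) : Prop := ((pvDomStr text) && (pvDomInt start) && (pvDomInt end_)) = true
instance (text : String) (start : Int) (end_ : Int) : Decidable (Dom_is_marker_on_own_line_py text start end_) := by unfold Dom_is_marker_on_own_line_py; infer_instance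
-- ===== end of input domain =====

-- B replaces A's two outward character-by-character walks by slicing at the marker, splitting
-- each side into lines, and testing whether the adjacent line fragment strips to empty
-- (objective: simpler).

-- ===== PORT A =====
def pvIsWS (c : Char) : Bool := c == ' ' || c == '\t'

def pvIsWSO : Option Char → Bool
  | some c => pvIsWS c
  | none => false

-- `while i > 0 and text[i-1] in " \t": i -= 1`, started at a nonnegative i
def pvBackScan (l : List Char) : Nat → Nat
  | 0 => 0
  | k+1 => if pvIsWSO (PySem.List.pyGet? l (k : Int)) then pvBackScan l k else k+1

-- `while j < n and text[j] in " \t": j += 1`, fuel = n - j at entry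
def pvFwdScan (l : List Char) : Nat → Int → Int
  | 0, j => j
  | f+1, j => if decide (j < (l.length : Int)) && pvIsWSO (PySem.List.pyGet? l j) then pvFwdScan l f (j+1) else j

def is_marker_on_own_line_py (text : String) (start : Int) (end_ : Int) : Bool :=
  let l := text.toList
  let i : Int := if 0 < start then (pvBackScan l start.toNat : Int) else start
  if 0 < i && !(PySem.List.pyGet? l (i - 1) == some '\n') then false
  else
    let n : Int := l.length
    let j := pvFwdScan l (n - end_).toNat end_
    if j < n && !(PySem.List.pyGet? l j == some '\n') then false
    else true

-- ===== PORT B =====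
-- before = text[:max(0, start)].split("\n")[-1]; after = text[end:].split("\n")[0];
-- return not before.strip(" \t") and not after.strip(" \t")
-- (split never returns an empty list, so the [-1]/[0] indexings cannot fail; .getD [] only
-- discharges the Option)
def is_marker_on_own_line_py_alt (text : String) (start : Int) (end_ : Int) : Bool :=
  let l := text.toList
  let before := (PySem.List.pyGet? (PySem.Chars.splitOn (PySem.List.slice l none (some (max 0 start))) ['\n']) (-1)).getD []
  let after := (PySem.List.pyGet? (PySem.Chars.splitOn (PySem.List.slice l (some end_) none) ['\n']) 0).getD []
  (PySem.Chars.stripChars before [' ', '\t']).isEmpty && (PySem.Chars.stripChars after [' ', '\t']).isEmpty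

-- ===== PRECONDITION & SPEC =====
-- Pre_ keeps the natural domain of a match span: start ≤ len (A raises IndexError beyond it)
-- and 0 ≤ end_ (A raises IndexError for end_ < -len, and for -len ≤ end_ < 0 its value depends
-- on negative-index wraparound that rescans the front of the string — an unspecified corner on
-- which B's slice reading is equally defensible).
def Pre_is_marker_on_own_line_py (text : String) (start : Int) (end_ : Int) : Prop :=
  start ≤ (text.toList.length : Int) ∧ 0 ≤ end_
instance (text : String) (start : Int) (end_ : Int) : Decidable (Pre_is_marker_on_own_line_py text start end_) := by unfold Pre_is_marker_on_own_line_py; infer_instance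

def pvWitness_is_marker_on_own_line_py : String × Int × Int := ("a\n x\ty\n", 3, 4)

def Spec_is_marker_on_own_line_py (text : String) (start : Int) (end_ : Int) (out : Bool) : Prop := out = is_marker_on_own_line_py_alt text start end_
instance (text : String) (start : Int) (end_ : Int) (out : Bool) : Decidable (Spec_is_marker_on_own_line_py text start end_ out) := by unfold Spec_is_marker_on_own_line_py; infer_instance

-- ===== CLAIM (what is proved, stated in full; the proofs are below) =====
def Claim_equal_is_marker_on_own_line_py : Prop := ∀ (text : String) (start : Int) (end_ : Int), Dom_is_marker_on_own_line_py text start end_ → Pre_is_marker_on_own_line_py text start end_ → Spec_is_marker_on_own_line_py text start end_ (is_marker_on_own_line_py text start end_)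

-- ===== LEMMAS AND PROOFS =====

-- "the marker edge is clean": reading a list of characters, after skipping spaces/tabs we
-- must be at end-of-list or at a newline.
def pvGoodEdge (t : List Char) : Bool :=
  match t.dropWhile pvIsWS with
  | [] => true
  | c :: _ => c == '\n'

theorem pvGoodEdge_cons (c : Char) (t : List Char) :
    pvGoodEdge (c :: t) = if pvIsWS c then pvGoodEdge t else (c == '\n') := by
  by_cases h : pvIsWS c = true <;> simp [pvGoodEdge, List.dropWhile, h]

theorem pvGoodEdge_eq_takeWhile (t : List Char) :
    pvGoodEdge t = (t.takeWhile (fun c => c != '\n')).all pvIsWS := by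
  induction t with
  | nil => decide
  | cons c t ih =>
    rw [pvGoodEdge_cons]
    by_cases h : pvIsWS c = true
    · have hne : (c != '\n') = true := by
        revert h; simp [pvIsWS]
        rintro (rfl | rfl) <;> decide
      rw [if_pos h, List.takeWhile_cons, hne]
      simp [h, ih]
    · rw [if_neg h]
      by_cases hc : c = '\n'
      · subst hc; simp
      · have hne : (c != '\n') = true := by simp [hc]
        rw [List.takeWhile_cons, hne]
        simp [h, hc]

-- ---- A-side: the two scanning loops compute pvGoodEdge of the outer slices ----

theorem pvFrontA_eq (l : List Char) (s : Nat) (hs : s ≤ l.length) :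
    (!(decide (0 < ((pvBackScan l s : Nat) : Int)) &&
       !(PySem.List.pyGet? l (((pvBackScan l s : Nat) : Int) - 1) == some '\n'))) =
      pvGoodEdge (l.take s).reverse := by
  induction s with
  | zero => simp [pvBackScan, pvGoodEdge]
  | succ k ih =>
    have hk : k < l.length := by omega
    have hget : PySem.List.pyGet? l (k : Int) = some l[k] := by
      rw [PySem.List.pyGet?_natCast]
      exact List.getElem?_eq_getElem hk
    have htake : l.take (k+1) = l.take k ++ [l[k]] := by
      rw [List.take_add_one, List.getElem?_eq_getElem hk]
      rfl
    rw [htake, List.reverse_append]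
    simp only [List.reverse_cons, List.reverse_nil, List.nil_append, List.singleton_append]
    rw [pvGoodEdge_cons]
    show (!(decide (0 < ((pvBackScan l (k+1) : Nat) : Int)) && _)) = _
    rw [pvBackScan]
    by_cases hw : pvIsWS l[k] = true
    · rw [if_pos (by simp [hget, pvIsWSO, hw])]
      rw [if_pos hw]
      exact ih (by omega)
    · rw [if_neg (by simp [hget, pvIsWSO, hw])]
      rw [if_neg hw]
      have h1 : (((k+1 : Nat) : Int)) - 1 = (k : Int) := by push_cast; ring
      rw [h1, hget]
      simp

theorem pvBackA_eq (l : List Char) (e f : Nat) (hf : f = l.length - e) (he : e ≤ l.length) :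
    (!(decide (pvFwdScan l f (e : Int) < (l.length : Int)) &&
       !(PySem.List.pyGet? l (pvFwdScan l f (e : Int)) == some '\n'))) =
      pvGoodEdge (l.drop e) := by
  induction f generalizing e with
  | zero =>
    have he' : e = l.length := by omega
    subst he'
    simp [pvFwdScan, pvGoodEdge]
  | succ f ih =>
    have hk : e < l.length := by omega
    have hget : PySem.List.pyGet? l (e : Int) = some l[e] := by
      rw [PySem.List.pyGet?_natCast]
      exact List.getElem?_eq_getElem hk
    have hdrop : l.drop e = l[e] :: l.drop (e+1) := List.drop_eq_getElem_cons hk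
    rw [hdrop, pvGoodEdge_cons]
    rw [pvFwdScan]
    by_cases hw : pvIsWS l[e] = true
    · rw [if_pos (by simp [hget, pvIsWSO, hw]; omega)]
      rw [if_pos hw]
      have : ((e : Int) + 1) = (((e+1 : Nat)) : Int) := by push_cast; ring
      rw [this]
      exact ih (e+1) (by omega) (by omega)
    · rw [if_neg (by simp [hget, pvIsWSO, hw])]
      rw [if_neg hw]
      rw [hget]
      simp [hk]

theorem pvIfNot (c : Bool) : (if c = true then false else true) = !c := by
  cases c <;> rfl

theorem pvIfAnd (c g : Bool) : (if c = true then false else g) = (!c && g) := by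
  cases c <;> simp

theorem pvPortA_eq' (text : String) (start end_ : Int) (hs : start ≤ (text.toList.length : Int)) (he : 0 ≤ end_) :
    is_marker_on_own_line_py text start end_ =
      (pvGoodEdge (text.toList.take start.toNat).reverse && pvGoodEdge (text.toList.drop end_.toNat)) := by
  simp only [is_marker_on_own_line_py]
  have hfront : (!(decide (0 < (if 0 < start then ((pvBackScan text.toList start.toNat : Nat) : Int) else start)) &&
      !(PySem.List.pyGet? text.toList ((if 0 < start then ((pvBackScan text.toList start.toNat : Nat) : Int) else start) - 1) == some '\n'))) =
      pvGoodEdge (text.toList.take start.toNat).reverse := by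
    rcases le_or_gt start 0 with hs0 | hs1
    · rw [if_neg (by omega)]
      have h0 : start.toNat = 0 := by omega
      rw [h0]
      have hc : (decide (0 < start) && !(PySem.List.pyGet? text.toList (start - 1) == some '\n')) = false := by
        simp; omega
      rw [hc]
      rfl
    · rw [if_pos hs1]
      exact pvFrontA_eq text.toList start.toNat (by omega)
  have hback : (if (decide (pvFwdScan text.toList ((((text.toList.length : Nat) : Int) - end_).toNat) end_ < ((text.toList.length : Nat) : Int)) &&
      !(PySem.List.pyGet? text.toList (pvFwdScan text.toList ((((text.toList.length : Nat) : Int) - end_).toNat) end_) == some '\n')) = true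
      then false else true) = pvGoodEdge (text.toList.drop end_.toNat) := by
    rcases le_or_gt end_ ((text.toList.length : Nat) : Int) with hle | hgt
    · have heeq : end_ = ((end_.toNat : Nat) : Int) := by omega
      have hfuel : ((((text.toList.length : Nat) : Int)) - end_).toNat = text.toList.length - end_.toNat := by omega
      rw [hfuel, heeq]
      simp only [Int.toNat_natCast]
      rw [← pvBackA_eq text.toList end_.toNat (text.toList.length - end_.toNat) rfl (by omega)]
      exact pvIfNot _
    · have hfuel : ((((text.toList.length : Nat) : Int)) - end_).toNat = 0 := by omega
      rw [hfuel]
      have hsc : pvFwdScan text.toList 0 end_ = end_ := rfl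
      have h1 : (decide (end_ < ((text.toList.length : Nat) : Int))) = false := by
        simp only [decide_eq_false_iff_not]
        omega
      rw [hsc, h1, Bool.false_and]
      have hdrop : text.toList.drop end_.toNat = [] := List.drop_eq_nil_of_le (by omega)
      rw [hdrop]
      rfl
  rw [hback, ← hfront]
  exact pvIfAnd _ _

-- ---- B-side: split("\n") as a clean structural recursion ----

def pvSplitNl : List Char → List Char → List (List Char)
  | [], cur => [cur.reverse]
  | c :: t, cur => if c = '\n' then cur.reverse :: pvSplitNl t [] else pvSplitNl t (c :: cur)

theorem pvGo_eq (fuel : Nat) : ∀ (l cur : List Char) (acc : List (List Char)), l.length < fuel →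
    PySem.Chars.splitOn.go ['\n'] fuel l cur acc = acc.reverse ++ pvSplitNl l cur := by
  induction fuel with
  | zero => intro l cur acc h; omega
  | succ f ih =>
    intro l cur acc h
    cases l with
    | nil =>
      rw [PySem.Chars.splitOn.go]
      · simp [pvSplitNl]
      · omega
    | cons c rest =>
      rw [PySem.Chars.splitOn.go]
      have hp : List.isPrefixOf ['\n'] (c :: rest) = ('\n' == c) := by simp [List.isPrefixOf]
      by_cases hc : c = '\n'
      · subst hc
        rw [hp]
        simp only [beq_self_eq_true, if_pos]
        have hd : List.drop (['\n'] : List Char).length ('\n' :: rest) = rest := rfl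
        rw [hd, ih rest [] (cur.reverse :: acc) (by simp at h ⊢; omega)]
        simp [pvSplitNl]
      · rw [hp]
        have : ('\n' == c) = false := by simp; intro he; exact hc he.symm
        rw [this]
        simp only [Bool.false_eq_true, if_false]
        rw [ih rest (c :: cur) acc (by simp at h ⊢; omega)]
        simp [pvSplitNl, if_neg hc]

theorem pvSplitOn_eq (l : List Char) : PySem.Chars.splitOn l ['\n'] = pvSplitNl l [] := by
  show PySem.Chars.splitOn.go ['\n'] (l.length + 1) l [] [] = _
  rw [pvGo_eq (l.length + 1) l [] [] (by omega)]
  rfl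

theorem pvSplitNl_ne_nil (l cur : List Char) : pvSplitNl l cur ≠ [] := by
  induction l generalizing cur with
  | nil => simp [pvSplitNl]
  | cons c t ih =>
    by_cases hc : c = '\n' <;> simp [pvSplitNl, hc, ih]

theorem pvSplitNl_head? (l : List Char) : ∀ cur,
    (pvSplitNl l cur).head? = some (cur.reverse ++ l.takeWhile (fun c => c != '\n')) := by
  induction l with
  | nil => intro cur; simp [pvSplitNl]
  | cons c t ih =>
    intro cur
    by_cases hc : c = '\n'
    · subst hc; simp [pvSplitNl]
    · have hne : (c != '\n') = true := by simp [hc]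
      rw [List.takeWhile_cons, hne]
      simp only [pvSplitNl, if_neg hc]
      rw [ih (c :: cur)]
      simp

theorem pvTakeWhile_append_of_mem (xs ys : List Char) (h : '\n' ∈ xs) :
    (xs ++ ys).takeWhile (fun c => c != '\n') = xs.takeWhile (fun c => c != '\n') := by
  induction xs with
  | nil => simp at h
  | cons c t ih =>
    by_cases hc : c = '\n'
    · subst hc; simp
    · have hne : (c != '\n') = true := by simp [hc]
      have hm : '\n' ∈ t := by
        rw [List.mem_cons] at h
        rcases h with h | h
        · exact absurd h.symm hc
        · exact h
      rw [List.cons_append, List.takeWhile_cons, List.takeWhile_cons, hne, ih hm]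

theorem pvTakeWhile_append_of_not_mem (xs ys : List Char) (h : '\n' ∉ xs) :
    (xs ++ ys).takeWhile (fun c => c != '\n') = xs ++ ys.takeWhile (fun c => c != '\n') := by
  induction xs with
  | nil => simp
  | cons c t ih =>
    have hc : c ≠ '\n' := fun he => h (by simp [he])
    have hne : (c != '\n') = true := by simp [hc]
    rw [List.cons_append, List.takeWhile_cons, hne, ih (fun hm => h (List.mem_cons_of_mem c hm))]
    rfl

theorem pvSplitNl_getLast? (l : List Char) : ∀ cur,
    (pvSplitNl l cur).getLast? =
      some (if '\n' ∈ l then (l.reverse.takeWhile (fun c => c != '\n')).reverse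
            else cur.reverse ++ l) := by
  induction l with
  | nil => intro cur; simp [pvSplitNl]
  | cons c t ih =>
    intro cur
    by_cases hc : c = '\n'
    · subst hc
      obtain ⟨x, xs, hx⟩ : ∃ x xs, pvSplitNl t [] = x :: xs := by
        cases hxx : pvSplitNl t [] with
        | nil => exact absurd hxx (pvSplitNl_ne_nil t [])
        | cons x xs => exact ⟨x, xs, rfl⟩
      have hstep : pvSplitNl ('\n' :: t) cur = cur.reverse :: pvSplitNl t [] := by
        simp [pvSplitNl]
      rw [hstep, hx, List.getLast?_cons_cons, ← hx, ih []]
      rw [if_pos (List.mem_cons_self)]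
      simp only [List.reverse_cons]
      by_cases hm : '\n' ∈ t
      · rw [if_pos hm, pvTakeWhile_append_of_mem t.reverse ['\n'] (by simpa using hm)]
      · rw [if_neg hm, pvTakeWhile_append_of_not_mem t.reverse ['\n'] (by simpa using hm)]
        simp
    · have hm : ('\n' ∈ c :: t) ↔ ('\n' ∈ t) := by
        rw [List.mem_cons]
        constructor
        · rintro (h | h)
          · exact absurd h.symm hc
          · exact h
        · exact Or.inr
      simp only [pvSplitNl, if_neg hc]
      rw [ih (c :: cur)]
      by_cases hmt : '\n' ∈ t
      · rw [if_pos hmt, if_pos (hm.mpr hmt)]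
        simp only [List.reverse_cons]
        rw [pvTakeWhile_append_of_mem t.reverse [c] (by simpa using hmt)]
      · rw [if_neg hmt, if_neg (fun h => hmt (hm.mp h))]
        simp

-- ---- stripChars / indexing glue ----

theorem pvContains_eq (c : Char) : (([' ', '\t'] : List Char).contains c) = pvIsWS c := by
  by_cases h1 : c = ' ' <;> by_cases h2 : c = '\t' <;> simp [pvIsWS, h1, h2, List.contains_eq_mem]

theorem pvStripEmpty (s : List Char) :
    (PySem.Chars.stripChars s [' ', '\t']).isEmpty = s.all pvIsWS := by
  simp only [PySem.Chars.stripChars]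
  have hp : (fun c => ([' ', '\t'] : List Char).contains c) = pvIsWS := funext pvContains_eq
  rw [hp]
  rw [Bool.eq_iff_iff]
  simp only [List.isEmpty_iff, List.reverse_eq_nil_iff, List.dropWhile_eq_nil_iff,
    List.mem_reverse, List.all_eq_true]
  constructor
  · intro h x hx
    have hsplit : s = s.takeWhile pvIsWS ++ s.dropWhile pvIsWS := (List.takeWhile_append_dropWhile).symm
    rw [hsplit] at hx
    rcases List.mem_append.mp hx with h1 | h1
    · exact List.mem_takeWhile_imp h1
    · exact h x h1
  · intro h x hx
    exact h x ((List.dropWhile_sublist _).subset hx)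

theorem pvPyGet_neg_one {α : Type} (L : List α) (h : L ≠ []) :
    PySem.List.pyGet? L (-1) = L.getLast? := by
  have hl : 0 < L.length := List.length_pos_iff.mpr h
  have h1 : (-(L.length : Int) ≤ -1) := by omega
  simp only [PySem.List.pyGet?, PySem.List.pyIdx?]
  rw [if_neg (by omega), if_pos h1]
  simp only [Option.bind_some]
  rw [List.getLast?_eq_getElem?]
  norm_num

theorem pvPyGet_zero {α : Type} (L : List α) : PySem.List.pyGet? L 0 = L.head? := by
  rw [show (0 : Int) = ((0 : Nat) : Int) from rfl, PySem.List.pyGet?_natCast]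
  rw [List.head?_eq_getElem?]

-- ---- B computes the same two pvGoodEdge checks ----

theorem pvPortB_eq' (text : String) (start end_ : Int) (he : 0 ≤ end_) :
    is_marker_on_own_line_py_alt text start end_ =
      (pvGoodEdge (text.toList.take start.toNat).reverse && pvGoodEdge (text.toList.drop end_.toNat)) := by
  simp only [is_marker_on_own_line_py_alt]
  rw [PySem.List.slice_to text.toList (le_max_left 0 start), PySem.List.slice_from text.toList he]
  have hmx : (max 0 start).toNat = start.toNat := by omega
  rw [hmx]
  set u := text.toList.take start.toNat with hu
  set v := text.toList.drop end_.toNat with hv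
  rw [pvSplitOn_eq u, pvSplitOn_eq v]
  rw [pvPyGet_neg_one _ (pvSplitNl_ne_nil u []), pvPyGet_zero]
  rw [pvSplitNl_getLast? u [], pvSplitNl_head? v []]
  simp only [Option.getD_some, List.reverse_nil, List.nil_append]
  rw [pvStripEmpty, pvStripEmpty]
  congr 1
  · rw [pvGoodEdge_eq_takeWhile u.reverse]
    by_cases hm : '\n' ∈ u
    · rw [if_pos hm, List.all_reverse]
    · rw [if_neg hm]
      have : u.reverse.takeWhile (fun c => c != '\n') = u.reverse := by
        rw [List.takeWhile_eq_self_iff]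
        intro x hx
        simp only [bne_iff_ne, ne_eq]
        intro hxe
        exact hm (by simpa [hxe] using List.mem_reverse.mp hx)
      rw [this, List.all_reverse]
  · rw [pvGoodEdge_eq_takeWhile v]

-- ===== VERDICT (by name: the statement is the Claim_ definition above) =====
theorem is_marker_on_own_line_py_spec : Claim_equal_is_marker_on_own_line_py := by
  intro text start end_ _hDom hPre
  obtain ⟨h1, h2⟩ := hPre
  unfold Spec_is_marker_on_own_line_py
  rw [pvPortA_eq' text start end_ h1 h2, pvPortB_eq' text start end_ h2]
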